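-- pv_equiv track=rewrite | github.com/sp863/algorithm_python | programmers/lvl_1/44_콜라문제*/44_콜라문제*.py | solution
-- ===== SOURCE A (Python) =====
-- def solution(a, b, n):
--     answer = 0
--
--     while (n >= a):
--         remain_bottle = n % a
--         n = (n//a) * b
--         answer += n
--         n += remain_bottle
--     return answer
-- ===== SOURCE B (Python) =====
-- def solution(a, b, n):
--     if n < a:
--         return 0
--     return (n - b) // (a - b) * b
-- ===== Notes on version B (the rewrite author's own statement) =====
-- stated objective: simpler
-- what changed: Replaced the exchange-simulation while-loop by the closed-form expression (n-b)//(a-b)*b (0 when n < a).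
-- outside the precondition, e.g. on solution(3, -2, 7): A returns -4, B returns -2
import Mathlib
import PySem

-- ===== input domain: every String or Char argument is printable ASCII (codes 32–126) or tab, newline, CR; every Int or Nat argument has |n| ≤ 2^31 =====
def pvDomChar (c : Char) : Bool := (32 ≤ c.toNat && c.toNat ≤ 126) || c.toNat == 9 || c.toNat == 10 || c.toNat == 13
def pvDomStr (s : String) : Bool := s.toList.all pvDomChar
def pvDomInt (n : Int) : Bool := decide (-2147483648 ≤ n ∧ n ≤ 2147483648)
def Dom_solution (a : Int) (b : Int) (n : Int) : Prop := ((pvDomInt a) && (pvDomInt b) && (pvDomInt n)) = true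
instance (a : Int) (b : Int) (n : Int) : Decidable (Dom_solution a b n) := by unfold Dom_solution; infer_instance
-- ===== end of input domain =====

-- B replaces A's exchange-simulation while-loop by the closed-form expression (n-b)//(a-b)*b; objective: simpler.


-- ===== PORT A =====
-- while-loop of A; the extra conjuncts 'b < a ∧ 1 ≤ a' of the guard are a pure
-- totality guard (where they fail and a ≤ n, the Python loop diverges or raises);
-- under Pre_solution the guard is exactly Python's 'n >= a'.
def solutionLoop (a : Int) (b : Int) (n : Int) (answer : Int) : Int :=
  if h : a ≤ n ∧ b < a ∧ 1 ≤ a then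
    -- remain_bottle = n % a ; n = (n//a)*b ; answer += n ; n += remain_bottle
    let remain_bottle := PySem.Int.mod n a
    let n' := PySem.Int.floordiv n a * b
    solutionLoop a b (n' + remain_bottle) (answer + n')
  else answer
termination_by (n + 1 - a).toNat
decreasing_by
  obtain ⟨h1, h2, h3⟩ := h
  have hfd : PySem.Int.floordiv n a = n / a := PySem.Int.floordiv_eq_ediv_of_pos (by omega)
  have hmd : PySem.Int.mod n a = n % a := PySem.Int.mod_eq_emod_of_pos (by omega)
  have hq : 1 ≤ n / a := Int.le_ediv_iff_mul_le (by omega) |>.2 (by omega)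
  have hne : n = a * (n / a) + n % a := (Int.ediv_add_emod n a).symm
  have hprod : 1 * 1 ≤ (n / a) * (a - b) := mul_le_mul hq (by omega) (by norm_num) (by omega)
  have hlt : n / a * b + n % a < n := by nlinarith
  simp only [hfd, hmd]
  set m := n / a * b + n % a with hm
  omega

def solution (a : Int) (b : Int) (n : Int) : Int :=
  solutionLoop a b n 0

-- ===== PORT B =====
def solution_alt (a : Int) (b : Int) (n : Int) : Int :=
  if n < a then 0
  else PySem.Int.floordiv (n - b) (a - b) * b

-- ===== PRECONDITION & SPEC =====
-- Pre_ keeps the natural cola-problem domain (1 ≤ a, 0 ≤ b < a) together with all trivial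
-- inputs n < a (where A returns 0 at once). It excludes: a = 0 ≤ n, where A raises
-- ZeroDivisionError; b ≥ a ≤ n, where A diverges; and b < 0 ≤ n - a, outside the problem's
-- natural domain (a negative bottle reward), where A still returns a value B does not match.
def Pre_solution (a : Int) (b : Int) (n : Int) : Prop :=
  n < a ∨ (1 ≤ a ∧ 0 ≤ b ∧ b < a)
instance (a : Int) (b : Int) (n : Int) : Decidable (Pre_solution a b n) := by
  unfold Pre_solution; infer_instance
def pvWitness_solution : Int × Int × Int := (3, 1, 20)

def Spec_solution (a : Int) (b : Int) (n : Int) (out : Int) : Prop := out = solution_alt a b n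
instance (a : Int) (b : Int) (n : Int) (out : Int) : Decidable (Spec_solution a b n out) := by
  unfold Spec_solution; infer_instance

-- ===== CLAIM (what is proved, stated in full; the proofs are below) =====
def Claim_equal_solution : Prop := ∀ (a : Int) (b : Int) (n : Int), Dom_solution a b n → Pre_solution a b n → Spec_solution a b n (solution a b n)

-- ===== LEMMAS AND PROOFS =====

-- Key telescoping identity for the quotient: one exchange step preserves the closed form.
theorem pv_key (a b n : Int) (h1 : 1 ≤ a) (h2 : b < a) (hn : a ≤ n) :
    (n - b) / (a - b) = n / a + (n / a * b + n % a - b) / (a - b) := by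
  have hc : a - b ≠ 0 := by omega
  have hne : n = a * (n / a) + n % a := (Int.ediv_add_emod n a).symm
  have hnum : n - b = (n / a * b + n % a - b) + (n / a) * (a - b) := by
    nlinarith [hne]
  calc (n - b) / (a - b)
      = ((n / a * b + n % a - b) + (n / a) * (a - b)) / (a - b) := by rw [← hnum]
    _ = (n / a * b + n % a - b) / (a - b) + n / a := Int.add_mul_ediv_right _ _ hc
    _ = n / a + (n / a * b + n % a - b) / (a - b) := by omega

-- solution_alt in ediv form, valid on the whole preconditioned range.
theorem pv_alt_eq (a b n : Int) (h1 : 1 ≤ a) (hb : 0 ≤ b) (h2 : b < a) (hn : b ≤ n) :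
    solution_alt a b n = (n - b) / (a - b) * b := by
  unfold solution_alt
  split_ifs with hlt
  · have hz : (n - b) / (a - b) = 0 := Int.ediv_eq_zero_of_lt (by omega) (by omega)
    rw [hz]; ring
  · rw [PySem.Int.floordiv_eq_ediv_of_pos (by omega)]

-- Loop invariant: the loop adds exactly the closed form to the accumulator.
theorem pv_loop (a b : Int) (h1 : 1 ≤ a) (hb : 0 ≤ b) (h2 : b < a) :
    ∀ (k : Nat) (n answer : Int), (n + 1 - a).toNat ≤ k →
      solutionLoop a b n answer = answer + solution_alt a b n := by
  intro k
  induction k with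
  | zero =>
    intro n answer hk
    have hn : n < a := by omega
    rw [solutionLoop, dif_neg (by omega)]
    unfold solution_alt
    rw [if_pos hn]; ring
  | succ k ih =>
    intro n answer hk
    by_cases hn : a ≤ n
    · rw [solutionLoop, dif_pos ⟨hn, h2, h1⟩]
      have hfd : PySem.Int.floordiv n a = n / a := PySem.Int.floordiv_eq_ediv_of_pos (by omega)
      have hmd : PySem.Int.mod n a = n % a := PySem.Int.mod_eq_emod_of_pos (by omega)
      simp only [hfd, hmd]
      have hq : 1 ≤ n / a := Int.le_ediv_iff_mul_le (by omega) |>.2 (by omega)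
      have hne : n = a * (n / a) + n % a := (Int.ediv_add_emod n a).symm
      have hr : 0 ≤ n % a := Int.emod_nonneg n (by omega)
      have hprod : 1 * 1 ≤ (n / a) * (a - b) := mul_le_mul hq (by omega) (by norm_num) (by omega)
      have hlt : n / a * b + n % a < n := by nlinarith
      have hbn' : b ≤ n / a * b + n % a := by nlinarith
      rw [ih (n / a * b + n % a) (answer + n / a * b) (by omega)]
      rw [pv_alt_eq a b n h1 hb h2 (by omega),
          pv_alt_eq a b (n / a * b + n % a) h1 hb h2 hbn',
          pv_key a b n h1 h2 hn]
      ring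
    · rw [solutionLoop, dif_neg (by omega)]
      unfold solution_alt
      rw [if_pos (by omega)]; ring

-- ===== VERDICT (by name: the statement is the Claim_ definition above) =====
theorem solution_spec : Claim_equal_solution := by
  intro a b n _ hpre
  unfold Spec_solution solution
  rcases hpre with hlt | ⟨h1, hb, h2⟩
  · rw [solutionLoop, dif_neg (by omega)]
    unfold solution_alt
    rw [if_pos hlt]
  · rw [pv_loop a b h1 hb h2 (n + 1 - a).toNat n 0 le_rfl]; ring
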